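-- pv_equiv track=rewrite | github.com/tuckerdickson/Software-Design | Computer Science Fundamentals/DS3/ds3.py | hasFourConsecVowels
-- ===== SOURCE A (Python) =====
-- def hasFourConsecVowels(word):
--     result = False
--     currIndex = 0
--
--     while (currIndex + 3) < len(word):
--
--         if ((word[currIndex] in "aeiou") and
--             (word[currIndex + 1] in "aeiou") and
--             (word[currIndex + 2] in "aeiou") and
--             (word[currIndex + 3] in "aeiou")):
--             result = True
--
--         currIndex += 1
--
--     return result
-- ===== SOURCE B (Python) =====
-- def hasFourConsecVowels(word):
--     run = 0
--     for ch in word: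
--         if ch in "aeiou":
--             run += 1
--             if run >= 4:
--                 return True
--         else:
--             run = 0
--     return False
-- ===== Notes on version B (the rewrite author's own statement) =====
-- stated objective: simpler
-- what changed: Replaces A's sliding four-index window test (with a result flag and full scan) by a single pass maintaining a run-length counter of consecutive vowels that returns early once the run reaches 4.
import Mathlib
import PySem

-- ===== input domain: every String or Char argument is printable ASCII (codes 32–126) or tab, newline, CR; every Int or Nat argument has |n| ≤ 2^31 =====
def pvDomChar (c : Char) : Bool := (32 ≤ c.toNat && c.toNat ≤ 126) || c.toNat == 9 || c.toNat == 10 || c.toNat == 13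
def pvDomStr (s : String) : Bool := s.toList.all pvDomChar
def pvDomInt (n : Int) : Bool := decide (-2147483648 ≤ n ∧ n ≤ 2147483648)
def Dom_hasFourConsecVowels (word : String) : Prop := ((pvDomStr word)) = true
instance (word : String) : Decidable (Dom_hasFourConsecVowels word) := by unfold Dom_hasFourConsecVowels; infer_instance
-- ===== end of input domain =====

-- B replaces A's four-index sliding-window test by a run-length counter with early return; objective: simpler.

-- `c in "aeiou"` on a single character: membership test, exact.
def pvIsVowel (c : Char) : Bool := "aeiou".toList.contains c

-- ===== PORT A =====
-- A's while loop; the guard currIndex+3 < len keeps every index in range, so getD is exact here.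
def pvLoopA (cs : List Char) (currIndex : Nat) (result : Bool) : Bool :=
  if currIndex + 3 < cs.length then
    pvLoopA cs (currIndex + 1)
      (if pvIsVowel (cs.getD currIndex ' ') && pvIsVowel (cs.getD (currIndex + 1) ' ') &&
          pvIsVowel (cs.getD (currIndex + 2) ' ') && pvIsVowel (cs.getD (currIndex + 3) ' ')
       then true else result)
  else result
termination_by cs.length - currIndex

def hasFourConsecVowels (word : String) : Bool :=
  pvLoopA word.toList 0 false

-- ===== PORT B =====
-- B's for loop over the characters with a run counter; early `return True` = returning true immediately.
def pvLoopB (cs : List Char) (run : Nat) : Bool :=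
  match cs with
  | [] => false
  | ch :: rest =>
    if pvIsVowel ch then
      if run + 1 ≥ 4 then true else pvLoopB rest (run + 1)
    else pvLoopB rest 0

def hasFourConsecVowels_alt (word : String) : Bool :=
  pvLoopB word.toList 0

-- ===== PRECONDITION & SPEC =====
def Spec_hasFourConsecVowels (word : String) (out : Bool) : Prop := out = hasFourConsecVowels_alt word
instance (word : String) (out : Bool) : Decidable (Spec_hasFourConsecVowels word out) := by unfold Spec_hasFourConsecVowels; infer_instance

-- ===== CLAIM (what is proved, stated in full; the proofs are below) =====
def Claim_equal_hasFourConsecVowels : Prop := ∀ (word : String), Dom_hasFourConsecVowels word → Spec_hasFourConsecVowels word (hasFourConsecVowels word)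

-- ===== LEMMAS AND PROOFS =====

-- Reference spec: some suffix starts with four vowels (stated on the vowel pattern).
def pvWin (bs : List Bool) : Bool :=
  match bs with
  | a :: b :: c :: d :: _ => a && b && c && d
  | _ => false

def pvSpec (bs : List Bool) : Bool := bs.tails.any pvWin

theorem pvWin_short (bs : List Bool) (h : bs.length < 4) : pvWin bs = false := by
  match bs with
  | [] | [_] | [_, _] | [_, _, _] => rfl
  | a :: b :: c :: d :: t => simp at h; omega

theorem pvSpec_short (bs : List Bool) (h : bs.length < 4) : pvSpec bs = false := by
  induction bs with
  | nil => rfl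
  | cons b t ih =>
    simp only [pvSpec, List.tails_cons, List.any_cons] at *
    rw [pvWin_short _ h, ih (by simp at h ⊢; omega)]
    rfl

theorem pvSpec_cons (b : Bool) (bs : List Bool) :
    pvSpec (b :: bs) = (pvWin (b :: bs) || pvSpec bs) := by
  simp [pvSpec]

theorem pvKey (a b c d r : Bool) (t : List Bool) :
    (r || pvSpec (a :: b :: c :: d :: t)) =
      ((if (a && b && c && d) = true then true else r) || pvSpec (b :: c :: d :: t)) := by
  rw [pvSpec_cons]
  have hw : pvWin (a :: b :: c :: d :: t) = (a && b && c && d) := rfl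
  rw [hw]
  cases (a && b && c && d) <;> cases r <;> simp

-- A's loop computes result || pvSpec of the pattern of the remaining suffix.
theorem pvLoopA_eq (cs : List Char) (i : Nat) (r : Bool) :
    pvLoopA cs i r = (r || pvSpec ((cs.drop i).map pvIsVowel)) := by
  by_cases h : i + 3 < cs.length
  · have hi : i < cs.length := by omega
    have hd : cs.drop i = cs[i] :: cs.drop (i + 1) := List.drop_eq_getElem_cons hi
    have h1 : i + 1 < cs.length := by omega
    have h2 : i + 2 < cs.length := by omega
    have hd1 : cs.drop (i + 1) = cs[i+1] :: cs.drop (i + 2) := List.drop_eq_getElem_cons h1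
    have hd2 : cs.drop (i + 2) = cs[i+2] :: cs.drop (i + 3) := List.drop_eq_getElem_cons h2
    have hd3 : cs.drop (i + 3) = cs[i+3] :: cs.drop (i + 4) := List.drop_eq_getElem_cons h
    have g0 : cs.getD i ' ' = cs[i] := List.getD_eq_getElem cs ' ' hi
    have g1 : cs.getD (i+1) ' ' = cs[i+1] := List.getD_eq_getElem cs ' ' h1
    have g2 : cs.getD (i+2) ' ' = cs[i+2] := List.getD_eq_getElem cs ' ' h2
    have g3 : cs.getD (i+3) ' ' = cs[i+3] := List.getD_eq_getElem cs ' ' h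
    have ih := pvLoopA_eq cs (i + 1) (if pvIsVowel (cs.getD i ' ') && pvIsVowel (cs.getD (i + 1) ' ') &&
          pvIsVowel (cs.getD (i + 2) ' ') && pvIsVowel (cs.getD (i + 3) ' ') then true else r)
    have e : (cs.drop i).map pvIsVowel
        = pvIsVowel cs[i] :: pvIsVowel cs[i+1] :: pvIsVowel cs[i+2] :: pvIsVowel cs[i+3]
            :: (cs.drop (i+4)).map pvIsVowel := by
      rw [hd, hd1, hd2, hd3]; rfl
    have e1 : (cs.drop (i+1)).map pvIsVowel
        = pvIsVowel cs[i+1] :: pvIsVowel cs[i+2] :: pvIsVowel cs[i+3]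
            :: (cs.drop (i+4)).map pvIsVowel := by
      rw [hd1, hd2, hd3]; rfl
    rw [pvLoopA, if_pos h, ih, g0, g1, g2, g3, e, e1, pvKey]
  · rw [pvLoopA, if_neg h, pvSpec_short, Bool.or_false]
    simp only [List.length_map, List.length_drop]
    omega
termination_by cs.length - i

-- Dropping k ≤ 3 leading `true`s followed by a `false` does not change pvSpec.
theorem pvSpec_pad_false (k : Nat) (hk : k ≤ 3) (bs : List Bool) :
    pvSpec (List.replicate k true ++ false :: bs) = pvSpec bs := by
  interval_cases k <;>
    simp [List.replicate, pvSpec_cons, pvWin] <;>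
    cases bs with
    | nil => simp
    | cons a t =>
      cases t with
      | nil => simp
      | cons b u =>
        cases u with
        | nil => simp
        | cons c w => simp

-- B's loop with counter k behaves like pvSpec of k vowels prepended.
theorem pvLoopB_eq (cs : List Char) (k : Nat) (hk : k ≤ 3) :
    pvLoopB cs k = pvSpec (List.replicate k true ++ cs.map pvIsVowel) := by
  induction cs generalizing k with
  | nil =>
    rw [pvLoopB, List.map_nil, List.append_nil, pvSpec_short]
    simp; omega
  | cons ch rest ih =>
    rw [pvLoopB]
    by_cases hv : pvIsVowel ch = true
    · rw [if_pos hv]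
      by_cases h4 : k + 1 ≥ 4
      · have hk3 : k = 3 := by omega
        rw [if_pos h4]
        subst hk3
        have : List.replicate 3 true ++ (ch :: rest).map pvIsVowel
            = true :: true :: true :: true :: rest.map pvIsVowel := by
          simp [List.replicate, hv]
        rw [this, pvSpec_cons, pvWin]
        simp
      · rw [if_neg h4, ih (k + 1) (by omega)]
        have : List.replicate k true ++ (ch :: rest).map pvIsVowel
            = List.replicate (k + 1) true ++ rest.map pvIsVowel := by
          rw [List.map_cons, hv, List.replicate_succ' , List.append_assoc]
          rfl
        rw [this]
    · rw [if_neg hv, ih 0 (by omega)]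
      have hvf : pvIsVowel ch = false := by
        cases hx : pvIsVowel ch
        · rfl
        · exact absurd hx hv
      rw [List.map_cons, hvf, pvSpec_pad_false k hk]
      rfl

-- ===== VERDICT (by name: the statement is the Claim_ definition above) =====
theorem hasFourConsecVowels_spec : Claim_equal_hasFourConsecVowels := by
  intro word _
  unfold Spec_hasFourConsecVowels hasFourConsecVowels hasFourConsecVowels_alt
  rw [pvLoopA_eq, pvLoopB_eq _ 0 (by omega)]
  simp
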